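-- pv_equiv track=rewrite | github.com/dioptra-io/georesolver | geogiant/ecs_vp_selection/hostname_selection.py | parse_hostname_per_main_org
-- ===== SOURCE A (Python) =====
-- from collections import defaultdict, OrderedDict
--
-- def parse_hostname_per_main_org(
--     hostname_per_main_org: list,
--     bgp_prefixes_per_hostname: dict,
--     bgp_prefix_threshold: int = 2,
-- ) -> dict:
--     """merge hosting organizations if they belong to the same company under different names"""
--
--     hostname_per_merged_main_orgs = defaultdict(list)
--     for main_org, hostnames in hostname_per_main_org:
--         for hostname in hostnames:
--             bgp_prefixes = bgp_prefixes_per_hostname[hostname]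
--
--             if len(bgp_prefixes) > bgp_prefix_threshold:
--
--                 if "AMAZON" in main_org:
--                     hostname_per_merged_main_orgs["AMAZON"].append(hostname)
--
--                 elif "GOOGLE" in main_org:
--                     hostname_per_merged_main_orgs["GOOGLE"].append(hostname)
--
--                 elif "AKAMAI" in main_org:
--                     hostname_per_merged_main_orgs["AKAMAI"].append(hostname)
--
--                 elif "APPLE" in main_org:
--                     hostname_per_merged_main_orgs["APPLE"].append(hostname)
--
--                 elif "MICROSOFT" in main_org:
--                     hostname_per_merged_main_orgs["MICROSOFT"].append(hostname)
--
--                 elif "TENCENT" in main_org: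
--                     hostname_per_merged_main_orgs["TENCENT"].append(hostname)
--
--                 elif "CHINANET" in main_org:
--                     hostname_per_merged_main_orgs["CHINANET"].append(hostname)
--
--                 elif "CMNET" in main_org:
--                     hostname_per_merged_main_orgs["CMNET"].append(hostname)
--
--                 else:
--                     hostname_per_merged_main_orgs[main_org].append(hostname)
--
--     return hostname_per_merged_main_orgs
-- ===== SOURCE B (Python) =====
-- from collections import defaultdict
--
-- TAGS = ("AMAZON", "GOOGLE", "AKAMAI", "APPLE", "MICROSOFT", "TENCENT", "CHINANET", "CMNET")
--
--
-- def parse_hostname_per_main_org(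
--     hostname_per_main_org: list,
--     bgp_prefixes_per_hostname: dict,
--     bgp_prefix_threshold: int = 2,
-- ) -> dict:
--     """merge hosting organizations if they belong to the same company under different names"""
--     # pass 1: flatten to (bucket, hostname) pairs for the qualifying hostnames
--     tagged = []
--     for main_org, hostnames in hostname_per_main_org:
--         bucket = next((t for t in TAGS if t in main_org), main_org)
--         for hostname in hostnames:
--             if len(bgp_prefixes_per_hostname[hostname]) > bgp_prefix_threshold:
--                 tagged.append((bucket, hostname))
--     # pass 2: build the result key by key, one gather per distinct bucket,
--     # in first-occurrence order (= the dict insertion order of A)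
--     merged = defaultdict(list)
--     for key in dict.fromkeys(k for k, _ in tagged):
--         merged[key] = [h for k, h in tagged if k == key]
--     return merged
-- ===== Notes on version B (the rewrite author's own statement) =====
-- stated objective: alternative
-- what changed: A streams every hostname into a dict of lists through an eight-branch elif chain; B does two staged passes instead: it flattens the input to a tagged (bucket, hostname) list using a first-match scan of an ordered tag tuple, then constructs the output key by key, gathering each distinct bucket's hostnames with one scan per key instead of maintaining per-key accumulators.
import Mathlib
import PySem

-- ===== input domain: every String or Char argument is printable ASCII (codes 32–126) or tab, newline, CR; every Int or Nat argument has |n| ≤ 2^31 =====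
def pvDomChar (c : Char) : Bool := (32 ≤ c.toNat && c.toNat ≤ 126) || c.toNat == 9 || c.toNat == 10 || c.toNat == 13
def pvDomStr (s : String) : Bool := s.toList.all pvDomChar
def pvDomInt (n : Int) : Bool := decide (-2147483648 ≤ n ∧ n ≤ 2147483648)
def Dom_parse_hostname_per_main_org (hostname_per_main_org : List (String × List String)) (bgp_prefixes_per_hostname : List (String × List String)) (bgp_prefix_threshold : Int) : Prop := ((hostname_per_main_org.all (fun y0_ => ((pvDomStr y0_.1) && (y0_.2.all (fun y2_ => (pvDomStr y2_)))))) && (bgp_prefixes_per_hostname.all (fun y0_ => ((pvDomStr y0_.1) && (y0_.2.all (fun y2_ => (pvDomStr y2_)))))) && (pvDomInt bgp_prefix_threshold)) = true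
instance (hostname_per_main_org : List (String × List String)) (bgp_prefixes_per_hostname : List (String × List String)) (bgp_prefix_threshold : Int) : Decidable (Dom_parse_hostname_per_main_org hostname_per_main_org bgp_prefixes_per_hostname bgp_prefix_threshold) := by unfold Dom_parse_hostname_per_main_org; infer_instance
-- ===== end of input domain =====

-- B replaces A's streaming dict-of-lists with eight-branch elif chain by two staged
-- passes: flatten to (bucket, hostname) pairs via a first-match tag scan, then build
-- the output key by key with one gather scan per distinct bucket. Same return value;
-- objective: alternative (not faster). Return-value equivalence only.

-- dict lookup `d[k]` on an association list: first match, [] only under Pre_ (KeyError excluded)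
def pvDictGetD (d : List (String × List String)) (k : String) : List String :=
  ((d.find? (fun p => p.1 == k)).map (·.2)).getD []

-- ===== PORT A =====
def parse_hostname_per_main_org (hostname_per_main_org : List (String × List String)) (bgp_prefixes_per_hostname : List (String × List String)) (bgp_prefix_threshold : Int) : List (String × List String) :=
  (hostname_per_main_org.foldl (fun acc pair =>
    pair.2.foldl (fun acc hostname =>
      let bgp_prefixes := pvDictGetD bgp_prefixes_per_hostname hostname
      if (bgp_prefixes.length : Int) > bgp_prefix_threshold then
        if PySem.Str.isIn "AMAZON" pair.1 then
          acc.modify "AMAZON" [] (· ++ [hostname])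
        else if PySem.Str.isIn "GOOGLE" pair.1 then
          acc.modify "GOOGLE" [] (· ++ [hostname])
        else if PySem.Str.isIn "AKAMAI" pair.1 then
          acc.modify "AKAMAI" [] (· ++ [hostname])
        else if PySem.Str.isIn "APPLE" pair.1 then
          acc.modify "APPLE" [] (· ++ [hostname])
        else if PySem.Str.isIn "MICROSOFT" pair.1 then
          acc.modify "MICROSOFT" [] (· ++ [hostname])
        else if PySem.Str.isIn "TENCENT" pair.1 then
          acc.modify "TENCENT" [] (· ++ [hostname])
        else if PySem.Str.isIn "CHINANET" pair.1 then
          acc.modify "CHINANET" [] (· ++ [hostname])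
        else if PySem.Str.isIn "CMNET" pair.1 then
          acc.modify "CMNET" [] (· ++ [hostname])
        else
          acc.modify pair.1 [] (· ++ [hostname])
      else acc) acc) (PySem.Dict.empty : PySem.Dict String (List String))).items

-- ===== PORT B =====
def pvTAGS : List String :=
  ["AMAZON", "GOOGLE", "AKAMAI", "APPLE", "MICROSOFT", "TENCENT", "CHINANET", "CMNET"]

-- next((t for t in TAGS if t in main_org), main_org)
def pvBucket (main_org : String) : String :=
  (pvTAGS.find? (fun t => PySem.Str.isIn t main_org)).getD main_org

def parse_hostname_per_main_org_alt (hostname_per_main_org : List (String × List String)) (bgp_prefixes_per_hostname : List (String × List String)) (bgp_prefix_threshold : Int) : List (String × List String) :=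
  -- pass 1: flatten to tagged (bucket, hostname) pairs
  let tagged := hostname_per_main_org.foldl (fun acc pair =>
    let bucket := pvBucket pair.1
    pair.2.foldl (fun acc hostname =>
      if ((pvDictGetD bgp_prefixes_per_hostname hostname).length : Int) > bgp_prefix_threshold then
        acc ++ [(bucket, hostname)]
      else acc) acc) []
  -- pass 2: one gather per distinct bucket, in first-occurrence order
  ((PySem.List.dedup (tagged.map Prod.fst)).foldl (fun merged key =>
      merged.insert key ((tagged.filter (fun p => p.1 == key)).map Prod.snd))
    (PySem.Dict.empty : PySem.Dict String (List String))).items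

-- ===== PRECONDITION & SPEC =====
-- Pre_ excludes exactly the KeyError inputs: some listed hostname absent from bgp_prefixes_per_hostname.
def Pre_parse_hostname_per_main_org (hostname_per_main_org : List (String × List String)) (bgp_prefixes_per_hostname : List (String × List String)) (bgp_prefix_threshold : Int) : Prop :=
  ∀ p ∈ hostname_per_main_org, ∀ h ∈ p.2, (bgp_prefixes_per_hostname.find? (fun q => q.1 == h)).isSome
instance (hostname_per_main_org : List (String × List String)) (bgp_prefixes_per_hostname : List (String × List String)) (bgp_prefix_threshold : Int) : Decidable (Pre_parse_hostname_per_main_org hostname_per_main_org bgp_prefixes_per_hostname bgp_prefix_threshold) := by unfold Pre_parse_hostname_per_main_org; infer_instance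

def pvWitness_parse_hostname_per_main_org : (List (String × List String)) × (List (String × List String)) × Int :=
  ([("AMAZON-02", ["a.com"]), ("OTHER", ["b.com"])],
   [("a.com", ["p1", "p2", "p3"]), ("b.com", ["p1"])], 2)

def Spec_parse_hostname_per_main_org (hostname_per_main_org : List (String × List String)) (bgp_prefixes_per_hostname : List (String × List String)) (bgp_prefix_threshold : Int) (out : List (String × List String)) : Prop := out = parse_hostname_per_main_org_alt hostname_per_main_org bgp_prefixes_per_hostname bgp_prefix_threshold
instance (hostname_per_main_org : List (String × List String)) (bgp_prefixes_per_hostname : List (String × List String)) (bgp_prefix_threshold : Int) (out : List (String × List String)) : Decidable (Spec_parse_hostname_per_main_org hostname_per_main_org bgp_prefixes_per_hostname bgp_prefix_threshold out) := by unfold Spec_parse_hostname_per_main_org; infer_instance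

-- ===== CLAIM =====
def Claim_equal_parse_hostname_per_main_org : Prop := ∀ (hostname_per_main_org : List (String × List String)) (bgp_prefixes_per_hostname : List (String × List String)) (bgp_prefix_threshold : Int), Dom_parse_hostname_per_main_org hostname_per_main_org bgp_prefixes_per_hostname bgp_prefix_threshold → Pre_parse_hostname_per_main_org hostname_per_main_org bgp_prefixes_per_hostname bgp_prefix_threshold → Spec_parse_hostname_per_main_org hostname_per_main_org bgp_prefixes_per_hostname bgp_prefix_threshold (parse_hostname_per_main_org hostname_per_main_org bgp_prefixes_per_hostname bgp_prefix_threshold)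

-- ===== LEMMAS AND PROOFS =====

-- the flattened tagged pairs both sides loop over, written closed-form
def pvTagged (hp : List (String × List String)) (bgp : List (String × List String)) (thr : Int) : List (String × String) :=
  hp.flatMap (fun pair =>
    (pair.2.filter (fun h => ((pvDictGetD bgp h).length : Int) > thr)).map (fun h => (pvBucket pair.1, h)))

-- A's elif chain picks exactly the bucket B computes from the tag list
theorem pv_chain_eq_bucket (acc : PySem.Dict String (List String)) (org hostname : String) :
    (if PySem.Str.isIn "AMAZON" org then acc.modify "AMAZON" [] (· ++ [hostname])
     else if PySem.Str.isIn "GOOGLE" org then acc.modify "GOOGLE" [] (· ++ [hostname])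
     else if PySem.Str.isIn "AKAMAI" org then acc.modify "AKAMAI" [] (· ++ [hostname])
     else if PySem.Str.isIn "APPLE" org then acc.modify "APPLE" [] (· ++ [hostname])
     else if PySem.Str.isIn "MICROSOFT" org then acc.modify "MICROSOFT" [] (· ++ [hostname])
     else if PySem.Str.isIn "TENCENT" org then acc.modify "TENCENT" [] (· ++ [hostname])
     else if PySem.Str.isIn "CHINANET" org then acc.modify "CHINANET" [] (· ++ [hostname])
     else if PySem.Str.isIn "CMNET" org then acc.modify "CMNET" [] (· ++ [hostname])
     else acc.modify org [] (· ++ [hostname]))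
      = acc.modify (pvBucket org) [] (· ++ [hostname]) := by
  simp only [pvBucket, pvTAGS, List.find?]
  split_ifs <;> simp_all

-- A's whole double loop is the grouping fold over the flattened tagged list
theorem pv_A_eq_fold_tagged (hp bgp : List (String × List String)) (thr : Int)
    (acc : PySem.Dict String (List String)) :
    hp.foldl (fun acc pair =>
      pair.2.foldl (fun acc hostname =>
        let bgp_prefixes := pvDictGetD bgp hostname
        if (bgp_prefixes.length : Int) > thr then
          if PySem.Str.isIn "AMAZON" pair.1 then acc.modify "AMAZON" [] (· ++ [hostname])
          else if PySem.Str.isIn "GOOGLE" pair.1 then acc.modify "GOOGLE" [] (· ++ [hostname])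
          else if PySem.Str.isIn "AKAMAI" pair.1 then acc.modify "AKAMAI" [] (· ++ [hostname])
          else if PySem.Str.isIn "APPLE" pair.1 then acc.modify "APPLE" [] (· ++ [hostname])
          else if PySem.Str.isIn "MICROSOFT" pair.1 then acc.modify "MICROSOFT" [] (· ++ [hostname])
          else if PySem.Str.isIn "TENCENT" pair.1 then acc.modify "TENCENT" [] (· ++ [hostname])
          else if PySem.Str.isIn "CHINANET" pair.1 then acc.modify "CHINANET" [] (· ++ [hostname])
          else if PySem.Str.isIn "CMNET" pair.1 then acc.modify "CMNET" [] (· ++ [hostname])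
          else acc.modify pair.1 [] (· ++ [hostname])
        else acc) acc) acc
    = (pvTagged hp bgp thr).foldl (fun d p => d.modify p.1 [] (· ++ [p.2])) acc := by
  induction hp generalizing acc with
  | nil => rfl
  | cons p t ih =>
    simp only [pvTagged, List.flatMap_cons, List.foldl_cons, List.foldl_append] at *
    rw [← ih]
    congr 1
    induction p.2 generalizing acc with
    | nil => rfl
    | cons h hs ih2 =>
      simp only [List.foldl_cons, List.filter_cons]
      by_cases hc : ((pvDictGetD bgp h).length : Int) > thr
      · simp only [hc, if_pos, decide_true, List.map_cons, List.foldl_cons]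
        rw [pv_chain_eq_bucket, ih2]
      · simp only [hc, decide_false, ih2]
        simp

-- B's pass-1 fold builds exactly pvTagged
theorem pv_B_tagged (hp bgp : List (String × List String)) (thr : Int)
    (acc : List (String × String)) :
    hp.foldl (fun acc pair =>
      let bucket := pvBucket pair.1
      pair.2.foldl (fun acc hostname =>
        if ((pvDictGetD bgp hostname).length : Int) > thr then acc ++ [(bucket, hostname)]
        else acc) acc) acc = acc ++ pvTagged hp bgp thr := by
  induction hp generalizing acc with
  | nil => simp [pvTagged]
  | cons p t ih =>
    simp only [pvTagged, List.flatMap_cons, List.foldl_cons] at *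
    rw [ih]
    have hinner : ∀ (a : List (String × String)), p.2.foldl (fun acc hostname =>
        if ((pvDictGetD bgp hostname).length : Int) > thr then acc ++ [(pvBucket p.1, hostname)]
        else acc) a
        = a ++ (p.2.filter (fun h => decide (((pvDictGetD bgp h).length : Int) > thr))).map
            (fun h => (pvBucket p.1, h)) := by
      intro a
      induction p.2 generalizing a with
      | nil => simp
      | cons h hs ih2 =>
        simp only [List.foldl_cons, List.filter_cons]
        by_cases hc : ((pvDictGetD bgp h).length : Int) > thr
        · simp [hc, ih2]
        · simp [hc, ih2]
    rw [hinner]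
    simp [List.append_assoc]

-- ===== VERDICT =====
theorem parse_hostname_per_main_org_spec : Claim_equal_parse_hostname_per_main_org := by
  intro hp bgp thr hdom hpre
  clear hdom hpre
  show _ = _
  unfold parse_hostname_per_main_org parse_hostname_per_main_org_alt
  rw [pv_A_eq_fold_tagged, pv_B_tagged]
  simp only [List.nil_append]
  -- both sides are now about pvTagged hp bgp thr
  set l := pvTagged hp bgp thr with hl
  -- A side: items of the modify-fold, characterised key by key
  have hnd : ((l.foldl (fun d p => d.modify p.1 [] (· ++ [p.2]))
      (PySem.Dict.empty : PySem.Dict String (List String))).keys).Nodup := by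
    exact PySem.Dict.nodup_keys_foldl_modify_key l Prod.fst [] (fun d p => (· ++ [p.2])) _
      (by simp [PySem.Dict.keys_empty])
  have hkeys : (l.foldl (fun d p => d.modify p.1 [] (· ++ [p.2]))
      (PySem.Dict.empty : PySem.Dict String (List String))).keys
      = PySem.List.dedup (l.map Prod.fst) := by
    rw [PySem.Dict.keys_foldl_modify_key]
    simp [PySem.Dict.keys_empty, PySem.Set.update_nil_left, PySem.List.dedup_eq_ofList]
  rw [PySem.Dict.items_eq_map_keys _ hnd []]
  -- B side: inserting fresh distinct keys appends
  rw [PySem.Dict.items_foldl_insert_fresh (k := fun key => key)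
      (v := fun key => (l.filter (fun p => p.1 == key)).map Prod.snd)]
  · rw [hkeys]
    simp only [show (PySem.Dict.empty : PySem.Dict String (List String)).items = [] from rfl, List.nil_append]
    apply List.map_congr_left
    intro k hk
    rw [PySem.Dict.getD_foldl_modify_append]
    simp [PySem.Dict.getD_empty]
  · intro a _; simp [PySem.Dict.contains_empty]
  · simp
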